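-- pv_equiv track=rewrite | github.com/thinhphan97/Mini-ORM | mini_orm/core/schema.py | _aggregate_index_rows
-- ===== SOURCE A (Python) =====
-- from collections import defaultdict
-- from typing import Any, Type
--
-- def _aggregate_index_rows(
--     rows: list[dict[str, Any]],
-- ) -> dict[str, tuple[tuple[str, ...], bool]]:
--     grouped: dict[str, list[tuple[int, str]]] = defaultdict(list)
--     unique_map: dict[str, bool] = {}
--     for row in rows:
--         name = str(_row_get(row, "index_name"))
--         column_name = str(_row_get(row, "column_name"))
--         position = int(_row_get(row, "ordinal_position", default=1))
--         unique = bool(_row_get(row, "is_unique"))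
--         grouped[name].append((position, column_name))
--         unique_map[name] = unique
--
--     parsed: dict[str, tuple[tuple[str, ...], bool]] = {}
--     for name, columns in grouped.items():
--         ordered = tuple(column for _, column in sorted(columns, key=lambda item: item[0]))
--         parsed[name] = (ordered, unique_map.get(name, False))
--     return parsed
--
-- def _row_get(row: dict[str, Any], *keys: str, default: Any = None) -> Any:
--     lowered = {str(key).lower(): value for key, value in row.items()}
--     sentinel = object()
--     for key in keys:
--         value = lowered.get(key.lower(), sentinel)
--         if value is not sentinel:
--             return value
--     return default
-- ===== SOURCE B (Python) =====
-- def _aggregate_index_rows(rows):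
--     agg = {}
--     for row in rows:
--         name = str(_row_get(row, "index_name"))
--         column_name = str(_row_get(row, "column_name"))
--         position = int(_row_get(row, "ordinal_position", default=1))
--         unique = bool(_row_get(row, "is_unique"))
--         cols = agg[name][0] if name in agg else []
--         agg[name] = (_insert_by_position(cols, position, column_name), unique)
--     return {name: (tuple(c for _, c in cols), unique) for name, (cols, unique) in agg.items()}
--
--
-- def _insert_by_position(cols, position, column_name):
--     out = list(cols)
--     for i, (p, _) in enumerate(out):
--         if position < p:
--             out.insert(i, (position, column_name))
--             return out
--     out.append((position, column_name))
--     return out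
--
--
-- def _row_get(row, *keys, default=None):
--     lowered = {str(key).lower(): value for key, value in row.items()}
--     sentinel = object()
--     for key in keys:
--         value = lowered.get(key.lower(), sentinel)
--         if value is not sentinel:
--             return value
--     return default
-- ===== Notes on version B (the rewrite author's own statement) =====
-- stated objective: alternative
-- what changed: B replaces A's two dicts (append-per-row, then a second pass that batch-sorts each group) with a single dict whose column list is kept position-ordered by inserting each column in place as rows stream by, so there is no sorted() call and no separate grouping pass.
import Mathlib
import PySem

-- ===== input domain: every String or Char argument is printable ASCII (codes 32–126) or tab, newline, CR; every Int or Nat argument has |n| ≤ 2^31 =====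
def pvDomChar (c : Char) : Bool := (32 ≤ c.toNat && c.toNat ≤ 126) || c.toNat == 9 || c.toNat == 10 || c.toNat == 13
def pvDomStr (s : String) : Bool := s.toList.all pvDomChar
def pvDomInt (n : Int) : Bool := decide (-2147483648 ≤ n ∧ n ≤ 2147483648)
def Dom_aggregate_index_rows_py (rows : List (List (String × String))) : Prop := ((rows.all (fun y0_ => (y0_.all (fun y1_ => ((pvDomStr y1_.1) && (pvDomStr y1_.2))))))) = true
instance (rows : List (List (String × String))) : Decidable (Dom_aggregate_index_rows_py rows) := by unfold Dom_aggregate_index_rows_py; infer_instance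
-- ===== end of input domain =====

-- B replaces A's two dicts plus per-group batch sort with one dict whose column lists are
-- kept position-ordered by inserting each column in place as rows stream by (no sorted() call,
-- no separate second grouping pass); same cost class, no speed claim.

-- ===== PORT A =====
-- _row_get (shared: B's Python reuses it unchanged).  The row dict is received as an
-- association list; Dict.ofList reproduces Python's dict construction (last value wins),
-- and rowLowered is the comprehension {str(key).lower(): value for key, value in row.items()}.
def rowLowered (row : List (String × String)) : PySem.Dict String String :=
  PySem.Dict.ofList ((PySem.Dict.ofList row).items.map (fun kv => (PySem.Str.lower kv.1, kv.2)))

def row_get_loop (lowered : PySem.Dict String String) : List String → Option String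
  | [] => none
  | k :: ks =>
    match lowered.get? (PySem.Str.lower k) with
    | some v => some v
    | none => row_get_loop lowered ks

def row_get (row : List (String × String)) (keys : List String) : Option String :=
  row_get_loop (rowLowered row) keys

def row_name (row : List (String × String)) : String := (row_get row ["index_name"]).getD "None"
def row_col (row : List (String × String)) : String := (row_get row ["column_name"]).getD "None"
-- int(_row_get(row, "ordinal_position", default=1)); none = Python ValueError (excluded by Pre_)
def row_pos? (row : List (String × String)) : Option Int :=
  match row_get row ["ordinal_position"] with
  | some v => PySem.Int.ofStr? v
  | none => some 1
def row_unique (row : List (String × String)) : Bool :=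
  match row_get row ["is_unique"] with
  | some v => v != ""
  | none => false

def aggregate_index_rows_py (rows : List (List (String × String))) : List (String × List String × Bool) :=
  let st := rows.foldl
    (fun (st : PySem.Dict String (List (Int × String)) × PySem.Dict String Bool) row =>
      let name := row_name row
      let column_name := row_col row
      let position := (row_pos? row).getD 0  -- `none` only where Python raises ValueError (outside Pre_)
      let unique := row_unique row
      (st.1.modify name [] (fun cols => cols ++ [(position, column_name)]), st.2.insert name unique))
    (PySem.Dict.mk [], PySem.Dict.mk [])
  let parsed := st.1.items.foldl
    (fun (parsed : PySem.Dict String (List String × Bool)) kv =>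
      let ordered := (PySem.List.sorted kv.2 (fun it => it.1) false).map (fun it => it.2)
      parsed.insert kv.1 (ordered, st.2.getD kv.1 false))
    (PySem.Dict.mk [])
  parsed.items

-- ===== PORT B =====
def insert_by_position (cols : List (Int × String)) (position : Int) (column_name : String) :
    List (Int × String) :=
  match cols with
  | [] => [(position, column_name)]
  | y :: ys =>
    if position < y.1 then (position, column_name) :: y :: ys
    else y :: insert_by_position ys position column_name

def aggregate_index_rows_py_alt (rows : List (List (String × String))) : List (String × List String × Bool) :=
  let agg := rows.foldl
    (fun (agg : PySem.Dict String (List (Int × String) × Bool)) row =>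
      let name := row_name row
      let column_name := row_col row
      let position := (row_pos? row).getD 0  -- `none` only where Python raises ValueError (outside Pre_)
      let unique := row_unique row
      let cols := match agg.get? name with | some v => v.1 | none => []
      agg.insert name (insert_by_position cols position column_name, unique))
    (PySem.Dict.mk [])
  agg.items.map (fun kv => (kv.1, kv.2.1.map (fun it => it.2), kv.2.2))

-- ===== PRECONDITION & SPEC =====
-- Pre_ excludes exactly the inputs where int() on the row's effective "ordinal_position"
-- value raises ValueError (A returns nowhere else abnormally).
def Pre_aggregate_index_rows_py (rows : List (List (String × String))) : Prop :=
  ∀ row ∈ rows, ∀ v : String,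
    (rowLowered row).get? "ordinal_position" = some v → (PySem.Int.ofStr? v).isSome = true
instance (rows : List (List (String × String))) : Decidable (Pre_aggregate_index_rows_py rows) := by
  unfold Pre_aggregate_index_rows_py; infer_instance

def pvWitness_aggregate_index_rows_py : (List (List (String × String))) :=
  [[("index_name", "idx"), ("column_name", "b"), ("ordinal_position", "2"), ("is_unique", "1")],
   [("INDEX_NAME", "idx"), ("column_name", "a"), ("ordinal_position", "1")],
   [("index_name", "other"), ("column_name", "c")]]

def Spec_aggregate_index_rows_py (rows : List (List (String × String))) (out : List (String × List String × Bool)) : Prop := out = aggregate_index_rows_py_alt rows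
instance (rows : List (List (String × String))) (out : List (String × List String × Bool)) : Decidable (Spec_aggregate_index_rows_py rows out) := by unfold Spec_aggregate_index_rows_py; infer_instance

-- ===== CLAIM (what is proved, stated in full; the proofs are below) =====
def Claim_equal_aggregate_index_rows_py : Prop := ∀ (rows : List (List (String × String))), Dom_aggregate_index_rows_py rows → Pre_aggregate_index_rows_py rows → Spec_aggregate_index_rows_py rows (aggregate_index_rows_py rows)

-- ===== LEMMAS AND PROOFS =====

-- insertion-sorted accumulation of a column list (what B maintains incrementally)
def sortIns (cols : List (Int × String)) : List (Int × String) :=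
  cols.foldl (fun acc x => PySem.List.insertBy (fun a b => decide (a.1 < b.1)) x acc) []

lemma insert_by_position_eq (cols : List (Int × String)) (p : Int) (c : String) :
    insert_by_position cols p c =
      PySem.List.insertBy (fun a b => decide (a.1 < b.1)) (p, c) cols := by
  induction cols with
  | nil => rfl
  | cons y ys ih => simp [insert_by_position, PySem.List.insertBy, ih]

lemma sortIns_append (l : List (Int × String)) (x : Int × String) :
    sortIns (l ++ [x]) = PySem.List.insertBy (fun a b => decide (a.1 < b.1)) x (sortIns l) := by
  simp [sortIns]

-- B's per-name entry in terms of A's state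
def mixF (u : PySem.Dict String Bool) (kv : String × List (Int × String)) :
    String × (List (Int × String) × Bool) :=
  (kv.1, (sortIns kv.2, u.getD kv.1 false))

-- A's two step functions and B's, named for the induction
def stepA (st : PySem.Dict String (List (Int × String)) × PySem.Dict String Bool)
    (row : List (String × String)) :
    PySem.Dict String (List (Int × String)) × PySem.Dict String Bool :=
  let name := row_name row
  let column_name := row_col row
  let position := (row_pos? row).getD 0
  let unique := row_unique row
  (st.1.modify name [] (fun cols => cols ++ [(position, column_name)]), st.2.insert name unique)

def stepB (agg : PySem.Dict String (List (Int × String) × Bool)) (row : List (String × String)) :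
    PySem.Dict String (List (Int × String) × Bool) :=
  let name := row_name row
  let column_name := row_col row
  let position := (row_pos? row).getD 0
  let unique := row_unique row
  let cols := match agg.get? name with | some v => v.1 | none => []
  agg.insert name (insert_by_position cols position column_name, unique)

lemma find?_items_map (g : List (String × List (Int × String))) (u : PySem.Dict String Bool)
    (name : String) :
    (g.map (mixF u)).find? (fun p => p.1 == name) =
      (g.find? (fun p => p.1 == name)).map (mixF u) := by
  induction g with
  | nil => rfl
  | cons kv g ih =>
    cases hb : (kv.1 == name) <;> simp [mixF, List.find?, hb, ih]

lemma contains_items_map (g : List (String × List (Int × String))) (u : PySem.Dict String Bool)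
    (name : String) :
    (g.map (mixF u)).any (fun p => p.1 == name) = g.any (fun p => p.1 == name) := by
  simp [List.any_map, Function.comp_def, mixF]

lemma get?_of_inv (g : PySem.Dict String (List (Int × String))) (u : PySem.Dict String Bool)
    (d : PySem.Dict String (List (Int × String) × Bool))
    (h : d.items = g.items.map (mixF u)) (name : String) :
    d.get? name = (g.items.find? (fun p => p.1 == name)).map
      (fun kv => (sortIns kv.2, u.getD kv.1 false)) := by
  unfold PySem.Dict.get?
  rw [h, find?_items_map]
  cases g.items.find? (fun p => p.1 == name) <;> simp [mixF]

lemma ins_inv (g : PySem.Dict String (List (Int × String))) (u : PySem.Dict String Bool)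
    (d : PySem.Dict String (List (Int × String) × Bool))
    (h : d.items = g.items.map (mixF u)) (name col : String) (pos : Int) (uniq : Bool) :
    (d.insert name
        (insert_by_position (match d.get? name with | some v => v.1 | none => []) pos col, uniq)).items
      = (g.modify name [] (fun cols => cols ++ [(pos, col)])).items.map
          (mixF (u.insert name uniq)) := by
  have hfind := get?_of_inv g u d h name
  have hany : (d.items.any fun p => p.1 == name) = (g.items.any fun p => p.1 == name) := by
    rw [h]; exact contains_items_map g.items u name
  have hu1 : ∀ k : String, k ≠ name → (u.insert name uniq).getD k false = u.getD k false :=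
    fun k hk => PySem.Dict.getD_insert_of_ne u uniq false hk
  have hu2 : (u.insert name uniq).getD name false = uniq :=
    PySem.Dict.getD_insert_self u name uniq false
  unfold PySem.Dict.modify
  set u' := u.insert name uniq with hu'
  by_cases hc : (g.items.any fun p => p.1 == name) = true
  · cases hf : g.items.find? (fun p => p.1 == name) with
    | none =>
      exfalso
      obtain ⟨p, hp, hpk⟩ := List.any_eq_true.mp hc
      have := List.find?_eq_none.mp hf p hp
      simp [hpk] at this
    | some kv0 =>
      have hgd : g.getD name [] = kv0.2 := by
        simp [PySem.Dict.getD, PySem.Dict.get?, hf]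
      rw [hfind, hf]
      simp only [Option.map_some, hgd]
      simp only [PySem.Dict.insert, PySem.Dict.contains, hany, hc, if_pos]
      rw [h, List.map_map, List.map_map]
      apply List.map_congr_left
      intro kv _
      cases hb : (kv.1 == name) with
      | false =>
        have hne : kv.1 ≠ name := by simpa using hb
        simp only [Function.comp_apply, mixF, hb, Bool.false_eq_true, if_false]
        rw [hu1 kv.1 hne]
      | true =>
        simp only [Function.comp_apply, mixF, hb, if_pos]
        refine Prod.ext rfl (Prod.ext ?_ ?_)
        · show insert_by_position (sortIns kv0.2) pos col = sortIns (kv0.2 ++ [(pos, col)])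
          rw [insert_by_position_eq, sortIns_append]
        · exact hu2.symm
  · have hf : g.items.find? (fun p => p.1 == name) = none := by
      cases hf : g.items.find? (fun p => p.1 == name) with
      | none => rfl
      | some kv0 =>
        exfalso
        have hmem := List.mem_of_find?_eq_some hf
        have hpk := List.find?_some hf
        exact hc (List.any_eq_true.mpr ⟨kv0, hmem, hpk⟩)
    have hgd : g.getD name [] = [] := by
      simp [PySem.Dict.getD, PySem.Dict.get?, hf]
    rw [hfind, hf]
    simp only [Option.map_none, hgd]
    simp only [PySem.Dict.insert, PySem.Dict.contains, hany, hc, Bool.false_eq_true, if_false]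
    rw [h, List.map_append]
    congr 1
    · apply List.map_congr_left
      intro kv hkv
      have hne : kv.1 ≠ name := by
        intro he
        exact hc (List.any_eq_true.mpr ⟨kv, hkv, by simp [he]⟩)
      simp only [mixF]
      rw [hu1 kv.1 hne]
    · simp only [List.map_cons, List.map_nil, mixF, List.nil_append]
      rw [hu2]
      rfl

lemma step_inv (g : PySem.Dict String (List (Int × String))) (u : PySem.Dict String Bool)
    (d : PySem.Dict String (List (Int × String) × Bool))
    (h : d.items = g.items.map (mixF u)) (row : List (String × String)) :
    (stepB d row).items = (stepA (g, u) row).1.items.map (mixF (stepA (g, u) row).2) := by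
  simp only [stepA, stepB]
  exact ins_inv g u d h (row_name row) (row_col row) ((row_pos? row).getD 0) (row_unique row)

lemma nodup_insert_keys (g : PySem.Dict String (List (Int × String))) (k : String)
    (v : List (Int × String)) (h : (g.items.map Prod.fst).Nodup) :
    (((g.insert k v).items.map Prod.fst)).Nodup := by
  unfold PySem.Dict.insert PySem.Dict.contains
  by_cases hc : (g.items.any fun p => p.1 == k) = true
  · simp only [hc, if_pos]
    have heq : (g.items.map (fun p => if (p.1 == k) = true then (k, v) else p)).map Prod.fst
        = g.items.map Prod.fst := by
      rw [List.map_map]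
      apply List.map_congr_left
      intro p _
      cases hb : (p.1 == k) with
      | false =>
        have hne : p.1 ≠ k := by simpa using hb
        simp [hne]
      | true =>
        have he := eq_of_beq hb
        simp [he]
    rw [heq]; exact h
  · simp only [hc, Bool.false_eq_true, if_false]
    have hk : k ∉ g.items.map Prod.fst := by
      intro hmem
      obtain ⟨p, hp, hpk⟩ := List.mem_map.mp hmem
      exact absurd (List.any_eq_true.mpr ⟨p, hp, by simp [hpk]⟩) hc
    rw [List.map_append, List.nodup_append]
    refine ⟨h, by simp, ?_⟩
    intro a ha b hbmem
    have he : b = k := by simpa using hbmem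
    subst he
    intro hak
    exact hk (hak ▸ ha)

lemma loop_inv (rows : List (List (String × String))) :
    ∀ (g : PySem.Dict String (List (Int × String))) (u : PySem.Dict String Bool)
      (d : PySem.Dict String (List (Int × String) × Bool)),
      d.items = g.items.map (mixF u) → (g.items.map Prod.fst).Nodup →
      (rows.foldl stepB d).items
          = (rows.foldl stepA (g, u)).1.items.map (mixF (rows.foldl stepA (g, u)).2)
        ∧ ((rows.foldl stepA (g, u)).1.items.map Prod.fst).Nodup := by
  induction rows with
  | nil => intro g u d h hn; exact ⟨h, hn⟩
  | cons row rows ih =>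
    intro g u d h hn
    have h' := step_inv g u d h row
    have hn' : ((stepA (g, u) row).1.items.map Prod.fst).Nodup := by
      unfold stepA PySem.Dict.modify
      exact nodup_insert_keys _ _ _ hn
    simpa using ih (stepA (g, u) row).1 (stepA (g, u) row).2 (stepB d row)
      (by simpa using h') hn'

lemma parsed_items (out : String × List (Int × String) → List String × Bool) :
    ∀ (l : List (String × List (Int × String))) (acc : PySem.Dict String (List String × Bool)),
      (∀ kv ∈ l, acc.contains kv.1 = false) → (l.map Prod.fst).Nodup →
      (l.foldl (fun parsed kv => parsed.insert kv.1 (out kv)) acc).items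
        = acc.items ++ l.map (fun kv => (kv.1, out kv)) := by
  intro l
  induction l with
  | nil => intro acc _ _; simp
  | cons kv l ih =>
    intro acc hacc hn
    have hc : acc.contains kv.1 = false := hacc kv (by simp)
    have hstep : (acc.insert kv.1 (out kv)).items = acc.items ++ [(kv.1, out kv)] := by
      simp only [PySem.Dict.insert, hc, Bool.false_eq_true, if_false]
    have hacc' : ∀ kv' ∈ l, (acc.insert kv.1 (out kv)).contains kv'.1 = false := by
      intro kv' hkv'
      have h1 : acc.contains kv'.1 = false := hacc kv' (by simp [hkv'])
      have h2 : kv.1 ≠ kv'.1 := by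
        have hnm : kv.1 ∉ l.map Prod.fst := (List.nodup_cons.mp hn).1
        intro he
        exact hnm (he ▸ List.mem_map.mpr ⟨kv', hkv', rfl⟩)
      simp only [PySem.Dict.contains] at h1 ⊢
      rw [hstep]
      simp [h1, h2]
    have hn' : (l.map Prod.fst).Nodup := (List.nodup_cons.mp hn).2
    rw [List.foldl_cons]
    rw [ih (acc.insert kv.1 (out kv)) hacc' hn', hstep]
    simp

-- ===== VERDICT (by name: the statement is the Claim_ definition above) =====
theorem aggregate_index_rows_py_spec : Claim_equal_aggregate_index_rows_py := by
  intro rows _ _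
  unfold Spec_aggregate_index_rows_py
  have init : (PySem.Dict.mk [] : PySem.Dict String (List (Int × String) × Bool)).items
      = (PySem.Dict.mk [] : PySem.Dict String (List (Int × String))).items.map
          (mixF (PySem.Dict.mk [])) := rfl
  obtain ⟨hinv, hnd⟩ := loop_inv rows (PySem.Dict.mk []) (PySem.Dict.mk []) (PySem.Dict.mk [])
    init (by simp)
  have ha : aggregate_index_rows_py rows
      = ((rows.foldl stepA (PySem.Dict.mk [], PySem.Dict.mk [])).1.items.foldl
          (fun parsed kv => parsed.insert kv.1
            ((PySem.List.sorted kv.2 (fun it => it.1) false).map (fun it => it.2),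
              (rows.foldl stepA (PySem.Dict.mk [], PySem.Dict.mk [])).2.getD kv.1 false))
          (PySem.Dict.mk [])).items := rfl
  have hb : aggregate_index_rows_py_alt rows
      = (rows.foldl stepB (PySem.Dict.mk [])).items.map
          (fun kv => (kv.1, kv.2.1.map (fun it => it.2), kv.2.2)) := rfl
  rw [ha, hb, parsed_items _ _ _ (by intro kv _; rfl) hnd, hinv, List.map_map]
  apply List.map_congr_left
  intro kv _
  simp [mixF, PySem.List.sorted, sortIns]
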